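-- pv_equiv track=rewrite | github.com/Vale-AS/AdventOfCode_2024 | src/day6fast.py | count_positions
-- ===== SOURCE A (Python) =====
-- def count_positions(obs, pos):
--     list_pos = []
--     if obs[0] == pos[0] and obs[1] < pos[1]:
--         for i in range(pos[1], obs[1],-1):
--             list_pos.append((pos[0],i))
--     if obs[0] == pos[0] and obs[1] > pos[1]:
--         for i in range(pos[1], obs[1]):
--             list_pos.append((pos[0],i))
--     if obs[1] == pos[1] and obs[0] < pos[0]:
--         for i in range(pos[0], obs[0],-1):
--             list_pos.append((i,pos[1]))
--     if obs[1] == pos[1] and obs[0] > pos[0]: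
--         for i in range(pos[0], obs[0]):
--             list_pos.append((i,pos[1]))
--     return list_pos
-- ===== SOURCE B (Python) =====
-- def count_positions(obs, pos):
--     # walk backward from the obstacle toward pos, one unit step at a time,
--     # collecting the cells strictly after obs up to and including pos,
--     # then reverse to get the pos-to-obstacle order
--     if pos[0] != obs[0] and pos[1] != obs[1]:
--         return []
--     sx = (pos[0] > obs[0]) - (pos[0] < obs[0])
--     sy = (pos[1] > obs[1]) - (pos[1] < obs[1])
--     out = []
--     x, y = obs
--     while (x, y) != pos:
--         x += sx
--         y += sy
--         out.append((x, y))
--     out.reverse()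
--     return out
-- ===== Notes on version B (the rewrite author's own statement) =====
-- stated objective: alternative
-- what changed: B builds the segment in the opposite direction: it walks step by step from the obstacle back toward pos with a while loop accumulating cells, then reverses the accumulator, instead of A's four forward range loops from pos.
import Mathlib
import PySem

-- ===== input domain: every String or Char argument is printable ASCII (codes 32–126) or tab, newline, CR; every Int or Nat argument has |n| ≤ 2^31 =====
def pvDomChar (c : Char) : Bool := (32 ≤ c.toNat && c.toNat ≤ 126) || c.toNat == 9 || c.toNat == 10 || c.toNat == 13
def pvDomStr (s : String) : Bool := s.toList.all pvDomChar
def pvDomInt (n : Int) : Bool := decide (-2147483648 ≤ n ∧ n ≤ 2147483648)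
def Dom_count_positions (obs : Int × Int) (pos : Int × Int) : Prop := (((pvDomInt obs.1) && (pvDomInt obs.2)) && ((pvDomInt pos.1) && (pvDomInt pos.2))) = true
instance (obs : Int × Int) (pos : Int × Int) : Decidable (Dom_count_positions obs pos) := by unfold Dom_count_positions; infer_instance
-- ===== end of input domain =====

-- B walks backward from the obstacle toward pos accumulating cells and reverses at the end,
-- instead of A's four forward range loops from pos (alternative decomposition; same values, same order).

-- ===== PORT A =====
-- literal transliteration: four sequential `if` blocks, each appending the points of its range loop
def count_positions (obs : Int × Int) (pos : Int × Int) : List (Int × Int) :=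
  let l0 : List (Int × Int) := []
  let l1 := if obs.1 = pos.1 ∧ obs.2 < pos.2 then
      l0 ++ (PySem.List.pyRange pos.2 obs.2 (-1)).map (fun i => (pos.1, i)) else l0
  let l2 := if obs.1 = pos.1 ∧ obs.2 > pos.2 then
      l1 ++ (PySem.List.pyRange pos.2 obs.2 1).map (fun i => (pos.1, i)) else l1
  let l3 := if obs.2 = pos.2 ∧ obs.1 < pos.1 then
      l2 ++ (PySem.List.pyRange pos.1 obs.1 (-1)).map (fun i => (i, pos.2)) else l2
  let l4 := if obs.2 = pos.2 ∧ obs.1 > pos.1 then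
      l3 ++ (PySem.List.pyRange pos.1 obs.1 1).map (fun i => (i, pos.2)) else l3
  l4

-- ===== PORT B =====
-- the `while (x, y) != pos` loop of Source B; the fuel argument is only a totality device
-- (the loop runs exactly |pos-obs| iterations, which is what the caller passes)
def pvWalk (pos : Int × Int) (sx sy : Int) : Nat → Int × Int → List (Int × Int)
  | 0, _ => []
  | fuel + 1, p =>
      if p = pos then []
      else
        let q := (p.1 + sx, p.2 + sy)
        q :: pvWalk pos sx sy fuel q

-- literal transliteration of Source B: backward walk from obs toward pos, then reverse
def count_positions_alt (obs : Int × Int) (pos : Int × Int) : List (Int × Int) :=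
  if pos.1 ≠ obs.1 ∧ pos.2 ≠ obs.2 then []
  else
    -- (a > b) - (a < b), Python's bool subtraction
    let sx := (if pos.1 > obs.1 then (1 : Int) else 0) - (if pos.1 < obs.1 then 1 else 0)
    let sy := (if pos.2 > obs.2 then (1 : Int) else 0) - (if pos.2 < obs.2 then 1 else 0)
    (pvWalk pos sx sy ((pos.1 - obs.1).natAbs + (pos.2 - obs.2).natAbs) obs).reverse

-- ===== PRECONDITION & SPEC =====
def Spec_count_positions (obs : Int × Int) (pos : Int × Int) (out : List (Int × Int)) : Prop := out = count_positions_alt obs pos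
instance (obs : Int × Int) (pos : Int × Int) (out : List (Int × Int)) : Decidable (Spec_count_positions obs pos out) := by unfold Spec_count_positions; infer_instance

-- ===== CLAIM (what is proved, stated in full; the proofs are below) =====
def Claim_equal_count_positions : Prop := ∀ (obs : Int × Int) (pos : Int × Int), Dom_count_positions obs pos → Spec_count_positions obs pos (count_positions obs pos)

-- ===== LEMMAS AND PROOFS =====

-- the horizontal walk of n unit steps s from (px - n*s) back to (px, ·) is the reversed segment
lemma pvWalk_h (px py s : Int) (hs : s = 1 ∨ s = -1) :
    ∀ (n fuel : Nat), n ≤ fuel →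
      pvWalk (px, py) s 0 fuel (px - n * s, py)
        = ((List.range n).map (fun (k : Nat) => (px - (k : Int) * s, py))).reverse := by
  intro n
  induction n with
  | zero =>
      intro fuel _
      cases fuel <;> simp only [pvWalk, Nat.cast_zero, zero_mul, sub_zero, List.range_zero,
        List.map_nil, List.reverse_nil, if_true]
  | succ n ih =>
      intro fuel hf
      obtain ⟨f, rfl⟩ : ∃ f, fuel = f + 1 := ⟨fuel - 1, by omega⟩
      have hcast : ((n + 1 : Nat) : Int) = (n : Int) + 1 := by omega
      rw [hcast]
      have hne : ((px - ((n : Int) + 1) * s, py) : Int × Int) ≠ (px, py) := by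
        rcases hs with rfl | rfl <;> (intro hEq; rw [Prod.mk.injEq] at hEq; omega)
      have hstep : px - ((n : Int) + 1) * s + s = px - (n : Int) * s := by ring
      rw [List.range_succ, List.map_append, List.reverse_append]
      simp only [pvWalk, if_neg hne, List.map_cons, List.map_nil, List.reverse_cons,
        List.reverse_nil, List.nil_append, List.singleton_append, hstep, add_zero]
      exact congrArg _ (ih f (by omega))

-- the vertical analogue
lemma pvWalk_v (px py s : Int) (hs : s = 1 ∨ s = -1) :
    ∀ (n fuel : Nat), n ≤ fuel →
      pvWalk (px, py) 0 s fuel (px, py - n * s)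
        = ((List.range n).map (fun (k : Nat) => (px, py - (k : Int) * s))).reverse := by
  intro n
  induction n with
  | zero =>
      intro fuel _
      cases fuel <;> simp only [pvWalk, Nat.cast_zero, zero_mul, sub_zero, List.range_zero,
        List.map_nil, List.reverse_nil, if_true]
  | succ n ih =>
      intro fuel hf
      obtain ⟨f, rfl⟩ : ∃ f, fuel = f + 1 := ⟨fuel - 1, by omega⟩
      have hcast : ((n + 1 : Nat) : Int) = (n : Int) + 1 := by omega
      rw [hcast]
      have hne : ((px, py - ((n : Int) + 1) * s) : Int × Int) ≠ (px, py) := by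
        rcases hs with rfl | rfl <;> (intro hEq; rw [Prod.mk.injEq] at hEq; omega)
      have hstep : py - ((n : Int) + 1) * s + s = py - (n : Int) * s := by ring
      rw [List.range_succ, List.map_append, List.reverse_append]
      simp only [pvWalk, if_neg hne, List.map_cons, List.map_nil, List.reverse_cons,
        List.reverse_nil, List.nil_append, List.singleton_append, hstep, add_zero]
      exact congrArg _ (ih f (by omega))

-- ===== VERDICT (by name: the statement is the Claim_ definition above) =====
theorem count_positions_spec : Claim_equal_count_positions := by
  intro obs pos _
  show count_positions obs pos = count_positions_alt obs pos
  obtain ⟨ox, oy⟩ := obs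
  obtain ⟨px, py⟩ := pos
  simp only [count_positions, count_positions_alt]
  split_ifs with h <;> try (exfalso; omega)
  · -- horizontal, obstacle to the right of pos: A loops range(px, ox)
    have he : oy = py := by omega
    subst he
    norm_num
    have hn : (px - ox).natAbs = (ox - px).toNat := by omega
    have hstart : ((ox, oy) : Int × Int) = (px - ((ox - px).toNat : Int) * (-1), oy) := by
      rw [Prod.mk.injEq]; omega
    rw [hn, hstart, pvWalk_h px oy (-1) (Or.inr rfl) _ _ le_rfl, List.reverse_reverse,
      PySem.List.pyRange_one, List.map_map]
    refine List.map_congr_left (fun k _ => ?_)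
    simp only [Function.comp_apply, Prod.mk.injEq]
    exact ⟨by ring, trivial⟩
  · -- horizontal, obstacle to the left of pos: A loops range(px, ox, -1)
    have he : oy = py := by omega
    subst he
    norm_num
    have hn : (px - ox).natAbs = (px - ox).toNat := by omega
    have hstart : ((ox, oy) : Int × Int) = (px - ((px - ox).toNat : Int) * 1, oy) := by
      rw [Prod.mk.injEq]; omega
    rw [hn, hstart, pvWalk_h px oy 1 (Or.inl rfl) _ _ le_rfl, List.reverse_reverse,
      PySem.List.pyRange_neg_one, List.map_map]
    refine List.map_congr_left (fun k _ => ?_)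
    simp only [Function.comp_apply, Prod.mk.injEq]
    exact ⟨by ring, trivial⟩
  · -- vertical, obstacle above pos: A loops range(py, oy)
    have he : ox = px := by omega
    subst he
    norm_num
    have hn : (py - oy).natAbs = (oy - py).toNat := by omega
    have hstart : ((ox, oy) : Int × Int) = (ox, py - ((oy - py).toNat : Int) * (-1)) := by
      rw [Prod.mk.injEq]; omega
    rw [hn, hstart, pvWalk_v ox py (-1) (Or.inr rfl) _ _ le_rfl, List.reverse_reverse,
      PySem.List.pyRange_one, List.map_map]
    refine List.map_congr_left (fun k _ => ?_)
    simp only [Function.comp_apply, Prod.mk.injEq]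
    exact ⟨trivial, by ring⟩
  · -- vertical, obstacle below pos: A loops range(py, oy, -1)
    have he : ox = px := by omega
    subst he
    norm_num
    have hn : (py - oy).natAbs = (py - oy).toNat := by omega
    have hstart : ((ox, oy) : Int × Int) = (ox, py - ((py - oy).toNat : Int) * 1) := by
      rw [Prod.mk.injEq]; omega
    rw [hn, hstart, pvWalk_v ox py 1 (Or.inl rfl) _ _ le_rfl, List.reverse_reverse,
      PySem.List.pyRange_neg_one, List.map_map]
    refine List.map_congr_left (fun k _ => ?_)
    simp only [Function.comp_apply, Prod.mk.injEq]
    exact ⟨trivial, by ring⟩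
  · -- diagonal: both sides empty
    rfl
  · -- obs = pos: the walk gets zero fuel and returns immediately
    have hn : (px - ox).natAbs + (py - oy).natAbs = 0 := by omega
    rw [hn]
    rfl
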